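-- pv_equiv track=rewrite | github.com/Plogeur/STOAT | stoat/list_snarl_paths.py | calcul_pos_type_variant
-- ===== SOURCE A (Python) =====
-- from typing import List, Tuple
--
-- def calcul_pos_type_variant(list_list_length_paths: List[List[str]]) -> Tuple[List[str], int]:
--     list_type_variant = []
--     padding = 0
--     just_snp = True
--
--     for path_lengths in list_list_length_paths:
--         if len(path_lengths) > 3 or path_lengths[1] == "_":  # Case snarl in snarl / Indel
--             list_type_variant.append("CPX")  # COMPLEX
--             just_snp = False
--         elif len(path_lengths) == 3:  # Case simple path len 3
--             if len(path_lengths[1]) == 1: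
--                 list_type_variant.append(path_lengths[1])  # add node str snp
--             else:
--                 ins_seq = "INS" if len(path_lengths[1]) > 3 else path_lengths[1]
--                 list_type_variant.append(ins_seq)
--                 just_snp = False
--         elif len(path_lengths) == 2:  # Deletion
--             list_type_variant.append("DEL")
--             just_snp = False
--         elif not path_lengths:  # Case path_lengths is empty
--             ValueError("path_lengths is empty")
--
--     # add +1 in pos for just SNP present in snarl
--     if just_snp:
--         padding = 1
--
--     return list_type_variant, padding
-- ===== SOURCE B (Python) =====
-- def calcul_pos_type_variant(list_list_length_paths):
--     def classify(path_lengths):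
--         if len(path_lengths) > 3 or path_lengths[1] == "_":
--             return "CPX"
--         if len(path_lengths) == 3:
--             mid = path_lengths[1]
--             if len(mid) == 1:
--                 return mid
--             return "INS" if len(mid) > 3 else mid
--         return "DEL"
--
--     list_type_variant = [classify(p) for p in list_list_length_paths]
--     padding = 1 if all(len(t) == 1 for t in list_type_variant) else 0
--     return list_type_variant, padding
-- ===== Notes on version B (the rewrite author's own statement) =====
-- stated objective: simpler
-- what changed: Replaces the explicit loop with a mutable just_snp flag by a pure per-path classifier mapped over the input, deriving padding afterwards as all(len(t)==1) over the produced list (single-char entries are exactly the SNP case).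
import Mathlib
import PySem

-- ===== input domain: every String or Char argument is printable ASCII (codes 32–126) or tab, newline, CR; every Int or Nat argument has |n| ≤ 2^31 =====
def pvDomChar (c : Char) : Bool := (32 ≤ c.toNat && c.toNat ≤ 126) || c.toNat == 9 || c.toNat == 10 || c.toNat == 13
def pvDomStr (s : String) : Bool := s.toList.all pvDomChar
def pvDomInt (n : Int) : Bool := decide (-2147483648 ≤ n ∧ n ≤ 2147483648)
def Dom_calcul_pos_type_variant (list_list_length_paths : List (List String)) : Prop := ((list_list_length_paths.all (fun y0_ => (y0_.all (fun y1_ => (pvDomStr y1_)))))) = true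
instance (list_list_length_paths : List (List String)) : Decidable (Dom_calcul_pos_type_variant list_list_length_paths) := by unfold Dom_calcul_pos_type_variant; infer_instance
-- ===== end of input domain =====

-- B replaces A's loop with a mutable just_snp flag by a pure per-path classifier mapped
-- over the input, deriving padding afterwards from the produced list (objective: simpler).


-- ===== PORT A =====
-- loop body over state (list_type_variant, just_snp); path_lengths[1] is total here
-- because Pre_ guarantees length ≥ 2 (Python raises IndexError otherwise).
def calcul_pos_type_variant (list_list_length_paths : List (List String)) : List String × Int :=
  let st := list_list_length_paths.foldl
    (fun (acc : List String × Bool) path_lengths =>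
      if path_lengths.length > 3 ∨ (PySem.List.pyGet? path_lengths 1).getD "" = "_" then
        (acc.1 ++ ["CPX"], false)
      else if path_lengths.length = 3 then
        let mid := (PySem.List.pyGet? path_lengths 1).getD ""
        if PySem.Str.len mid = 1 then (acc.1 ++ [mid], acc.2)
        else (acc.1 ++ [if PySem.Str.len mid > 3 then "INS" else mid], false)
      else if path_lengths.length = 2 then
        (acc.1 ++ ["DEL"], false)
      else
        (acc.1, acc.2))   -- empty path_lengths: A only builds (and discards) a ValueError
    ([], true)
  (st.1, if st.2 then 1 else 0)

-- ===== PORT B =====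
def pvClassify (path_lengths : List String) : String :=
  if path_lengths.length > 3 ∨ (PySem.List.pyGet? path_lengths 1).getD "" = "_" then "CPX"
  else if path_lengths.length = 3 then
    let mid := (PySem.List.pyGet? path_lengths 1).getD ""
    if PySem.Str.len mid = 1 then mid
    else if PySem.Str.len mid > 3 then "INS" else mid
  else "DEL"

def calcul_pos_type_variant_alt (list_list_length_paths : List (List String)) : List String × Int :=
  let list_type_variant := list_list_length_paths.map pvClassify
  (list_type_variant,
   if list_type_variant.all (fun t => PySem.Str.len t = 1) then 1 else 0)

-- ===== PRECONDITION & SPEC =====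
-- Pre_ excludes inputs containing an inner list of length < 2: there Python A raises
-- IndexError on path_lengths[1].
def Pre_calcul_pos_type_variant (list_list_length_paths : List (List String)) : Prop :=
  ∀ p ∈ list_list_length_paths, 2 ≤ p.length
instance (list_list_length_paths : List (List String)) : Decidable (Pre_calcul_pos_type_variant list_list_length_paths) := by unfold Pre_calcul_pos_type_variant; infer_instance
def pvWitness_calcul_pos_type_variant : List (List String) := [["4", "g", "2"], ["1", "_"], ["5", "6"]]

def Spec_calcul_pos_type_variant (list_list_length_paths : List (List String)) (out : List String × Int) : Prop := out = calcul_pos_type_variant_alt list_list_length_paths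
instance (list_list_length_paths : List (List String)) (out : List String × Int) : Decidable (Spec_calcul_pos_type_variant list_list_length_paths out) := by unfold Spec_calcul_pos_type_variant; infer_instance

-- ===== CLAIM (what is proved, stated in full; the proofs are below) =====
def Claim_equal_calcul_pos_type_variant : Prop := ∀ (list_list_length_paths : List (List String)), Dom_calcul_pos_type_variant list_list_length_paths → Pre_calcul_pos_type_variant list_list_length_paths → Spec_calcul_pos_type_variant list_list_length_paths (calcul_pos_type_variant list_list_length_paths)

-- ===== LEMMAS AND PROOFS =====

-- One iteration of A's loop body appends pvClassify p and updates the flag to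
-- js && "the appended string has length 1" (lists of length ≥ 2 only).
theorem pv_step (p : List String) (hp : 2 ≤ p.length) (lt : List String) (js : Bool) :
    (if p.length > 3 ∨ (PySem.List.pyGet? p 1).getD "" = "_" then (lt ++ ["CPX"], false)
     else if p.length = 3 then
       let mid := (PySem.List.pyGet? p 1).getD ""
       if PySem.Str.len mid = 1 then (lt ++ [mid], js)
       else (lt ++ [if PySem.Str.len mid > 3 then "INS" else mid], false)
     else if p.length = 2 then (lt ++ ["DEL"], false)
     else (lt, js))
    = (lt ++ [pvClassify p], js && decide (PySem.Str.len (pvClassify p) = 1)) := by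
  unfold pvClassify
  generalize (PySem.List.pyGet? p 1).getD "" = m
  by_cases h1 : p.length > 3 ∨ m = "_"
  · rw [if_pos h1, if_pos h1]
    simp [PySem.Str.len]
  · rw [if_neg h1, if_neg h1]
    by_cases h3 : p.length = 3
    · rw [if_pos h3, if_pos h3]
      by_cases hm : PySem.Str.len m = 1
      · simp only [hm, if_pos, decide_true, Bool.and_true]
      · rw [if_neg hm, if_neg hm]
        by_cases hg : PySem.Str.len m > 3
        · rw [if_pos hg]
          simp [PySem.Str.len]
        · rw [if_neg hg]
          simp only [PySem.Str.len_eq] at hm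
          simp
          intro _
          rw [← String.length_toList]
          exact_mod_cast hm
    · rw [if_neg h3, if_neg h3]
      have h2 : p.length = 2 := by omega
      rw [if_pos h2]
      simp [PySem.Str.len]

-- Loop invariant for the whole fold.
theorem pv_fold_eq (xs : List (List String)) (h : ∀ p ∈ xs, 2 ≤ p.length)
    (lt : List String) (js : Bool) :
    xs.foldl
      (fun (acc : List String × Bool) path_lengths =>
        if path_lengths.length > 3 ∨ (PySem.List.pyGet? path_lengths 1).getD "" = "_" then
          (acc.1 ++ ["CPX"], false)
        else if path_lengths.length = 3 then
          let mid := (PySem.List.pyGet? path_lengths 1).getD ""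
          if PySem.Str.len mid = 1 then (acc.1 ++ [mid], acc.2)
          else (acc.1 ++ [if PySem.Str.len mid > 3 then "INS" else mid], false)
        else if path_lengths.length = 2 then
          (acc.1 ++ ["DEL"], false)
        else
          (acc.1, acc.2)) (lt, js)
    = (lt ++ xs.map pvClassify,
       js && xs.all (fun p => PySem.Str.len (pvClassify p) = 1)) := by
  induction xs generalizing lt js with
  | nil => simp
  | cons p xs ih =>
    have hp : 2 ≤ p.length := h p (List.mem_cons_self ..)
    have hrest : ∀ q ∈ xs, 2 ≤ q.length := fun q hq => h q (List.mem_cons_of_mem _ hq)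
    rw [List.foldl_cons, pv_step p hp lt js, ih hrest]
    simp [Bool.and_assoc]

-- ===== VERDICT (by name: the statement is the Claim_ definition above) =====
theorem calcul_pos_type_variant_spec : Claim_equal_calcul_pos_type_variant := by
  intro xs _ hpre
  unfold Spec_calcul_pos_type_variant calcul_pos_type_variant calcul_pos_type_variant_alt
  rw [pv_fold_eq xs hpre [] true]
  simp [List.all_map, Function.comp]
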